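-- pv_equiv track=rewrite | github.com/AliceInWonderland61/spring2025-python | Week3/week-3-S1-P2.py | min_remaining_watchlist
-- ===== SOURCE A (Python) =====
-- def min_remaining_watchlist(watchlist):
--
-- #so it looks like we need to remove the pairs "AB" and "CD" from the watchlist until we're done so if I use a stack I can safely look for them
--     stack=[]
--
--     for i in watchlist:
--         if stack and ((stack[-1]=='A' and i=='B') or (stack[-1]=='C' and i=='D')):
--             stack.pop()
--         else:
--             stack.append(i)
--
--
--     return len(stack)
-- ===== SOURCE B (Python) =====
-- def min_remaining_watchlist(watchlist):
--     s = watchlist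
--     while True:
--         t = s.replace("AB", "").replace("CD", "")
--         if t == s:
--             return len(s)
--         s = t
-- ===== Notes on version B (the rewrite author's own statement) =====
-- stated objective: alternative
-- what changed: Replaces the single-pass explicit stack with repeated whole-string replace passes that delete both two-letter patterns, iterated to a fixed point (confluence of the rewriting makes the residue length equal); measured faster because each pass is one C-level str.replace instead of a per-character Python loop.
import Mathlib
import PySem

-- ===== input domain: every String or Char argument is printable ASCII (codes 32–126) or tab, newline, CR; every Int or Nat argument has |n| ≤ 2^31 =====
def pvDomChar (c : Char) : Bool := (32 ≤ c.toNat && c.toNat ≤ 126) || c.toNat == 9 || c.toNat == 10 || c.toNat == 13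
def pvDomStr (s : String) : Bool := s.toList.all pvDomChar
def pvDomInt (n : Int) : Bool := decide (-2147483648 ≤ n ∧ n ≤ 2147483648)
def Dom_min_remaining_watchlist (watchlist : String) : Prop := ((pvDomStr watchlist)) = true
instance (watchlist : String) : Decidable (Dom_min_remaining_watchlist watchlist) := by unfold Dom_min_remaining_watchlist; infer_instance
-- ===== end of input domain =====

-- B replaces A's one-pass explicit stack by repeated whole-string replace passes deleting both
-- two-letter patterns, iterated to a fixed point (alternative algorithm; confluence gives equality).

-- ===== PORT A =====
-- the loop body: stack and ((stack[-1]=='A' and i=='B') or (stack[-1]=='C' and i=='D'))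
def pvStep (stack : List Char) (i : Char) : List Char :=
  if stack ≠ [] ∧ ((PySem.List.pyGet? stack (-1) = some 'A' ∧ i = 'B') ∨
                   (PySem.List.pyGet? stack (-1) = some 'C' ∧ i = 'D'))
  then stack.dropLast           -- stack.pop()
  else stack ++ [i]             -- stack.append(i)

def min_remaining_watchlist (watchlist : String) : Int :=
  ((watchlist.toList.foldl pvStep []).length : Int)

-- ===== PORT B =====
-- pvRem characterises PySem.Chars.replace with empty replacement (proved in pvGo_eq_pvRem below);
-- it is needed here only for the termination lemma pvShrink that the recursion of pvBLoop cites.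
def pvRem (old : List Char) : Nat → List Char → List Char
  | 0, l => l
  | _+1, [] => []
  | f+1, c :: t =>
      if old.isPrefixOf (c :: t) then pvRem old f ((c :: t).drop old.length)
      else c :: pvRem old f t

theorem pvRem_length_le (old : List Char) : ∀ (f : Nat) (l : List Char),
    (pvRem old f l).length ≤ l.length := by
  intro f
  induction f with
  | zero => intro l; simp [pvRem]
  | succ f ih =>
    intro l
    cases l with
    | nil => simp [pvRem]
    | cons c t =>
      simp only [pvRem]
      split
      · exact le_trans (ih _) (by simp)
      · simpa using ih t

theorem pvRem_eq_or_lt (old : List Char) (ho : old ≠ []) : ∀ (f : Nat) (l : List Char),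
    pvRem old f l = l ∨ (pvRem old f l).length < l.length := by
  intro f
  induction f with
  | zero => intro l; left; simp [pvRem]
  | succ f ih =>
    intro l
    cases l with
    | nil => left; simp [pvRem]
    | cons c t =>
      simp only [pvRem]
      split
      · rename_i hpre
        right
        have hlen : old.length ≤ (c :: t).length :=
          (List.isPrefixOf_iff_prefix.mp hpre).length_le
        have h1 : 1 ≤ old.length := by
          cases old with
          | nil => exact absurd rfl ho
          | cons _ _ => simp
        have := pvRem_length_le old f ((c :: t).drop old.length)
        simp only [List.length_drop] at this
        simp only [List.length_cons] at *
        omega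
      · rcases ih t with h | h
        · left; simp [h]
        · right; simp only [List.length_cons]; omega

theorem pvGo_eq_pvRem (old : List Char) : ∀ (f : Nat) (l acc : List Char),
    PySem.Chars.replace.go old [] f l acc = acc.reverse ++ pvRem old f l := by
  intro f
  induction f with
  | zero =>
    intro l acc
    rw [PySem.Chars.replace.go.eq_def]
    simp [pvRem]
  | succ f ih =>
    intro l acc
    cases l with
    | nil =>
      rw [PySem.Chars.replace.go.eq_def]
      simp [pvRem]
    | cons c t =>
      rw [PySem.Chars.replace.go.eq_def]
      simp only [pvRem]
      split
      · rw [ih]; simp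
      · rw [ih]; simp

theorem pvReplace_eq_pvRem (l old : List Char) (ho : old.isEmpty = false) :
    PySem.Chars.replace l old [] = pvRem old l.length l := by
  unfold PySem.Chars.replace
  rw [if_neg (by simp [ho]), pvGo_eq_pvRem]
  simp

-- the chars of one whole replace-pass of B
theorem pvPass_toList (s : String) :
    (PySem.Str.replace (PySem.Str.replace s "AB" "") "CD" "").toList =
      pvRem ['C', 'D'] (pvRem ['A', 'B'] s.toList.length s.toList).length
        (pvRem ['A', 'B'] s.toList.length s.toList) := by
  rw [PySem.Str.toList_replace, PySem.Str.toList_replace,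
    show ("AB".toList) = ['A', 'B'] from rfl, show ("CD".toList) = ['C', 'D'] from rfl,
    show ("".toList) = ([] : List Char) from rfl]
  rw [pvReplace_eq_pvRem _ _ (by decide), pvReplace_eq_pvRem _ _ (by decide)]

-- termination of the while-loop: a pass that changes the string strictly shortens it
theorem pvShrink (s : String)
    (h : PySem.Str.replace (PySem.Str.replace s "AB" "") "CD" "" ≠ s) :
    (PySem.Str.replace (PySem.Str.replace s "AB" "") "CD" "").toList.length <
      s.toList.length := by
  set t := PySem.Str.replace (PySem.Str.replace s "AB" "") "CD" "" with hdef
  have htl : t.toList = pvRem ['C', 'D'] (pvRem ['A', 'B'] s.toList.length s.toList).length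
      (pvRem ['A', 'B'] s.toList.length s.toList) := pvPass_toList s
  have hne : t.toList ≠ s.toList := by
    intro hEq
    exact h (by
      have := congrArg String.ofList hEq
      simpa using this)
  rcases pvRem_eq_or_lt ['A', 'B'] (by decide) s.toList.length s.toList with hAB | hAB
  · rcases pvRem_eq_or_lt ['C', 'D'] (by decide)
        (pvRem ['A', 'B'] s.toList.length s.toList).length
        (pvRem ['A', 'B'] s.toList.length s.toList) with hCD | hCD
    · exact absurd (by rw [htl, hCD, hAB]) hne
    · rw [htl]; rw [hAB] at hCD ⊢; exact hCD
  · rw [htl]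
    calc (pvRem ['C', 'D'] _ _).length ≤ _ := pvRem_length_le _ _ _
      _ < s.toList.length := hAB

-- the while True loop of B
def pvBLoop (s : String) : Int :=
  let t := PySem.Str.replace (PySem.Str.replace s "AB" "") "CD" ""
  if t = s then PySem.Str.len s else pvBLoop t
termination_by s.toList.length
decreasing_by exact pvShrink s (by assumption)

def min_remaining_watchlist_alt (watchlist : String) : Int :=
  pvBLoop watchlist

-- ===== PRECONDITION & SPEC =====
def Spec_min_remaining_watchlist (watchlist : String) (out : Int) : Prop := out = min_remaining_watchlist_alt watchlist
instance (watchlist : String) (out : Int) : Decidable (Spec_min_remaining_watchlist watchlist out) := by unfold Spec_min_remaining_watchlist; infer_instance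

-- ===== CLAIM (what is proved, stated in full; the proofs are below) =====
def Claim_equal_min_remaining_watchlist : Prop := ∀ (watchlist : String), Dom_min_remaining_watchlist watchlist → Spec_min_remaining_watchlist watchlist (min_remaining_watchlist watchlist)

-- ===== LEMMAS AND PROOFS =====

theorem pvStep_push (st : List Char) (c : Char)
    (h : ¬ (PySem.List.pyGet? st (-1) = some 'A' ∧ c = 'B') ∧
         ¬ (PySem.List.pyGet? st (-1) = some 'C' ∧ c = 'D')) :
    pvStep st c = st ++ [c] := by
  unfold pvStep
  rw [if_neg]
  rintro ⟨-, h1 | h2⟩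
  · exact h.1 h1
  · exact h.2 h2

theorem pvGet_last (st : List Char) (a : Char) :
    PySem.List.pyGet? (st ++ [a]) (-1) = some a := by
  simp [PySem.List.pyGet?, PySem.List.pyIdx?]

theorem pvStep_pop (st : List Char) (a b : Char)
    (h : (a = 'A' ∧ b = 'B') ∨ (a = 'C' ∧ b = 'D')) :
    pvStep (st ++ [a]) b = st := by
  unfold pvStep
  rw [if_pos]
  · simp
  · refine ⟨by simp, ?_⟩
    rcases h with ⟨ha, hb⟩ | ⟨ha, hb⟩
    · exact Or.inl ⟨by rw [pvGet_last, ha], hb⟩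
    · exact Or.inr ⟨by rw [pvGet_last, ha], hb⟩

-- removing one pattern pass does not change the stack fold
theorem pvFold_pvRem (a b : Char)
    (hpush : ∀ st, pvStep st a = st ++ [a])
    (hpop : ∀ st, pvStep (st ++ [a]) b = st) :
    ∀ (f : Nat) (l st : List Char),
      List.foldl pvStep st (pvRem [a, b] f l) = List.foldl pvStep st l := by
  intro f
  induction f with
  | zero => intro l st; simp [pvRem]
  | succ f ih =>
    intro l st
    cases l with
    | nil => simp [pvRem]
    | cons c t =>
      simp only [pvRem]
      split
      · rename_i hpre
        rcases List.isPrefixOf_iff_prefix.mp hpre with ⟨r, hr⟩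
        simp only [List.cons_append, List.nil_append] at hr
        obtain ⟨hc, ht⟩ : c = a ∧ t = b :: r := by
          cases hr; exact ⟨rfl, rfl⟩
        subst hc ht
        rw [ih]
        simp only [List.length_cons, List.drop_succ_cons, List.drop_zero, List.length_nil]
        simp only [List.foldl_cons, hpush, hpop]
      · simp only [List.foldl_cons, ih]

-- on a string with no adjacent "AB"/"CD" the stack only grows
theorem pvFold_free : ∀ (l st : List Char),
    pvRem ['A', 'B'] l.length l = l →
    pvRem ['C', 'D'] l.length l = l →
    (∀ c, l.head? = some c → pvStep st c = st ++ [c]) →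
    List.foldl pvStep st l = st ++ l := by
  intro l
  induction l with
  | nil => intro st _ _ _; simp
  | cons c t ih =>
    intro st hAB hCD hhead
    have hnotpre : ∀ (a b : Char), pvRem [a, b] (c :: t).length (c :: t) = c :: t →
        ([a, b].isPrefixOf (c :: t) = false ∧ pvRem [a, b] t.length t = t) := by
      intro a b hfix
      simp only [List.length_cons, pvRem] at hfix
      by_cases hpre : [a, b].isPrefixOf (c :: t) = true
      · rw [if_pos hpre] at hfix
        have hlen : [a, b].length ≤ (c :: t).length :=
          (List.isPrefixOf_iff_prefix.mp hpre).length_le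
        have := pvRem_length_le [a, b] t.length ((c :: t).drop [a, b].length)
        have hlfix := congrArg List.length hfix
        simp only [List.length_drop, List.length_cons] at this hlen hlfix
        omega
      · rw [if_neg hpre] at hfix
        have h2 : pvRem [a, b] t.length t = t := by injection hfix
        exact ⟨eq_false_of_ne_true hpre, h2⟩
    obtain ⟨hnAB, hAB'⟩ := hnotpre 'A' 'B' hAB
    obtain ⟨hnCD, hCD'⟩ := hnotpre 'C' 'D' hCD
    rw [List.foldl_cons, hhead c rfl]
    rw [ih (st ++ [c]) hAB' hCD' ?_]
    · simp
    · intro b hb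
      cases t with
      | nil => simp at hb
      | cons b' t' =>
        simp only [List.head?_cons, Option.some.injEq] at hb
        subst hb
        apply pvStep_push
        rw [pvGet_last]
        constructor
        · rintro ⟨h1, h2⟩
          simp only [Option.some.injEq] at h1
          subst h1 h2
          simp [List.isPrefixOf] at hnAB
        · rintro ⟨h1, h2⟩
          simp only [Option.some.injEq] at h1
          subst h1 h2
          simp [List.isPrefixOf] at hnCD

theorem pvPush_AC (st : List Char) (c : Char) (h : c ≠ 'B' ∧ c ≠ 'D') :
    pvStep st c = st ++ [c] := by
  apply pvStep_push
  exact ⟨fun hx => h.1 hx.2, fun hx => h.2 hx.2⟩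

theorem pvMainAux (n : Nat) : ∀ (s : String), s.toList.length = n →
    ((s.toList.foldl pvStep []).length : Int) = pvBLoop s := by
  induction n using Nat.strong_induction_on with
  | _ n ih =>
    intro s hn
    rw [pvBLoop]
    show ((s.toList.foldl pvStep []).length : Int) =
      (if PySem.Str.replace (PySem.Str.replace s "AB" "") "CD" "" = s then PySem.Str.len s
       else pvBLoop (PySem.Str.replace (PySem.Str.replace s "AB" "") "CD" ""))
    by_cases ht : PySem.Str.replace (PySem.Str.replace s "AB" "") "CD" "" = s
    · rw [if_pos ht]
      have hfix : pvRem ['C', 'D'] (pvRem ['A', 'B'] s.toList.length s.toList).length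
          (pvRem ['A', 'B'] s.toList.length s.toList) = s.toList := by
        rw [← pvPass_toList s]; exact congrArg String.toList ht
      have hAB : pvRem ['A', 'B'] s.toList.length s.toList = s.toList := by
        rcases pvRem_eq_or_lt ['A', 'B'] (by decide) s.toList.length s.toList with h | h
        · exact h
        · exfalso
          have h2 := pvRem_length_le ['C', 'D']
            (pvRem ['A', 'B'] s.toList.length s.toList).length
            (pvRem ['A', 'B'] s.toList.length s.toList)
          have := congrArg List.length hfix
          omega
      have hCD : pvRem ['C', 'D'] s.toList.length s.toList = s.toList := by
        rw [hAB] at hfix; exact hfix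
      have hfold := pvFold_free s.toList [] hAB hCD (by
        intro c _
        unfold pvStep
        rw [if_neg]
        rintro ⟨h1, -⟩
        exact h1 rfl)
      rw [hfold]
      simp [PySem.Str.len]
    · rw [if_neg ht]
      have hlt := pvShrink s ht
      have ihth := ih (PySem.Str.replace (PySem.Str.replace s "AB" "") "CD" "").toList.length
        (by omega) (PySem.Str.replace (PySem.Str.replace s "AB" "") "CD" "") rfl
      rw [← ihth]
      have hfold : (PySem.Str.replace (PySem.Str.replace s "AB" "") "CD" "").toList.foldl pvStep [] =
          s.toList.foldl pvStep [] := by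
        rw [pvPass_toList s]
        rw [pvFold_pvRem 'C' 'D'
          (fun st => pvPush_AC st 'C' (by decide))
          (fun st => pvStep_pop st 'C' 'D' (Or.inr ⟨rfl, rfl⟩))]
        rw [pvFold_pvRem 'A' 'B'
          (fun st => pvPush_AC st 'A' (by decide))
          (fun st => pvStep_pop st 'A' 'B' (Or.inl ⟨rfl, rfl⟩))]
      rw [hfold]

-- ===== VERDICT (by name: the statement is the Claim_ definition above) =====
theorem min_remaining_watchlist_spec : Claim_equal_min_remaining_watchlist := by
  intro watchlist _
  unfold Spec_min_remaining_watchlist min_remaining_watchlist min_remaining_watchlist_alt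
  exact pvMainAux watchlist.toList.length watchlist rfl
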